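-- pv_equiv track=rewrite | github.com/inesouazene/holbertonschool-Markdown2HTML | markdown2html.py | convert_markdown_ol_list_to_html
-- ===== SOURCE A (Python) =====
-- def convert_markdown_ol_list_to_html(lines):
--     """
--     Convert Markdown ordered list syntax to HTML.
--
--     Args:
--         lines (list): List of lines from the Markdown file.
--
--     Returns:
--         list: List of converted lines with HTML ordered list.
--     """
--     in_list = False
--     html_lines = []
--
--     for line in lines:
--         if line.startswith("* "):
--             line_content = line[2:].strip()
--             if not in_list:
--                 html_lines.append("<ol>\n")
--                 in_list = True
--             html_lines.append(f"   <li>{line_content}</li>\n")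
--         else:
--             if in_list:
--                 html_lines.append("</ol>\n")
--                 in_list = False
--             html_lines.append(line)
--
--     if in_list:
--         html_lines.append("</ol>\n")
--
--     return html_lines
-- ===== SOURCE B (Python) =====
-- def convert_markdown_ol_list_to_html(lines):
--     """Run-based rewrite: split lines into consecutive runs of '* ' items and
--     wrap each run in <ol>...</ol>; no in_list flag, no post-loop close."""
--     out = []
--     i, n = 0, len(lines)
--     while i < n:
--         if lines[i].startswith("* "):
--             j = i
--             while j < n and lines[j].startswith("* "):
--                 j += 1
--             out.append("<ol>\n")
--             out.extend("   <li>{}</li>\n".format(l[2:].strip()) for l in lines[i:j])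
--             out.append("</ol>\n")
--             i = j
--         else:
--             out.append(lines[i])
--             i += 1
--     return out
-- ===== Notes on version B (the rewrite author's own statement) =====
-- stated objective: alternative
-- what changed: Replaces the per-line in_list flag state machine (with its post-loop close) by a run-based two-pointer scan that finds each maximal run of '* ' lines and emits the whole <ol> block at once.
import Mathlib
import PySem

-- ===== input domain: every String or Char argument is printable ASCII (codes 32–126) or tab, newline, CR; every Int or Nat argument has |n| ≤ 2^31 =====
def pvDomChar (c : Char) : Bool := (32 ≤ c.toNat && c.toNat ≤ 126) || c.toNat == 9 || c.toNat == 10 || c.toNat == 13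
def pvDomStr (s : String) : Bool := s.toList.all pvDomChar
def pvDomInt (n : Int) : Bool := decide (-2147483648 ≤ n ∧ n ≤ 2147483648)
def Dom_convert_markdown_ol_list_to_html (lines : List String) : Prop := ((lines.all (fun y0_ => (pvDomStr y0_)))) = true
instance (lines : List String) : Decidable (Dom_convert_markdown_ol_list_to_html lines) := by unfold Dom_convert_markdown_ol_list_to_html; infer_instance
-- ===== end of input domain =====

-- B replaces A's in_list flag state machine by a run-based scan over maximal '* ' runs (objective: alternative decomposition, same cost).

-- ===== PORT A =====
-- loop body of A's for-loop: state = (in_list, html_lines)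
def pvStepA (st : Bool × List String) (line : String) : Bool × List String :=
  if PySem.Str.startswith line "* " then
    let line_content := PySem.Str.strip (PySem.Str.slice line (some 2) none)
    let st1 := if !st.1 then (true, st.2 ++ ["<ol>\n"]) else st
    (st1.1, st1.2 ++ ["   <li>" ++ line_content ++ "</li>\n"])
  else
    let st1 := if st.1 then (false, st.2 ++ ["</ol>\n"]) else st
    (st1.1, st1.2 ++ [line])

def convert_markdown_ol_list_to_html (lines : List String) : List String :=
  let st := lines.foldl pvStepA (false, [])
  if st.1 then st.2 ++ ["</ol>\n"] else st.2

-- ===== PORT B =====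
def pvIsItem (l : String) : Bool := PySem.Str.startswith l "* "
def pvItem (l : String) : String :=
  "   <li>" ++ PySem.Str.strip (PySem.Str.slice l (some 2) none) ++ "</li>\n"

-- run-based scan: a maximal run of item lines becomes one <ol>…</ol> block
def convert_markdown_ol_list_to_html_alt : List String → List String
  | [] => []
  | l :: ls =>
    if pvIsItem l then
      "<ol>\n" :: pvItem l ::
        ((ls.takeWhile pvIsItem).map pvItem ++
          "</ol>\n" :: convert_markdown_ol_list_to_html_alt (ls.dropWhile pvIsItem))
    else
      l :: convert_markdown_ol_list_to_html_alt ls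
termination_by l => l.length
decreasing_by
  · have := List.length_dropWhile_le pvIsItem ls
    simp; omega
  · simp

-- ===== PRECONDITION & SPEC =====
def Spec_convert_markdown_ol_list_to_html (lines : List String) (out : List String) : Prop := out = convert_markdown_ol_list_to_html_alt lines
instance (lines : List String) (out : List String) : Decidable (Spec_convert_markdown_ol_list_to_html lines out) := by unfold Spec_convert_markdown_ol_list_to_html; infer_instance

-- ===== CLAIM (what is proved, stated in full; the proofs are below) =====
def Claim_equal_convert_markdown_ol_list_to_html : Prop := ∀ (lines : List String), Dom_convert_markdown_ol_list_to_html lines → Spec_convert_markdown_ol_list_to_html lines (convert_markdown_ol_list_to_html lines)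

-- ===== LEMMAS AND PROOFS =====
def pvFinish (st : Bool × List String) : List String :=
  if st.1 then st.2 ++ ["</ol>\n"] else st.2

-- the loop invariant, for both states of the in_list flag
theorem pvLoop (ls : List String) : ∀ acc : List String,
    pvFinish (ls.foldl pvStepA (false, acc)) = acc ++ convert_markdown_ol_list_to_html_alt ls ∧
    pvFinish (ls.foldl pvStepA (true, acc)) =
      acc ++ (ls.takeWhile pvIsItem).map pvItem ++
        "</ol>\n" :: convert_markdown_ol_list_to_html_alt (ls.dropWhile pvIsItem) := by
  induction ls with
  | nil => intro acc; simp [pvFinish, convert_markdown_ol_list_to_html_alt]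
  | cons l ls ih =>
    intro acc
    by_cases h : pvIsItem l = true
    · constructor
      · rw [List.foldl_cons, show pvStepA (false, acc) l
          = (true, (acc ++ ["<ol>\n"]) ++ ["   <li>" ++ PySem.Str.strip (PySem.Str.slice l (some 2) none) ++ "</li>\n"]) by
            simp [pvStepA, pvIsItem] at h ⊢; simp [h]]
        rw [(ih _).2]
        simp [convert_markdown_ol_list_to_html_alt, h, pvItem]
      · rw [List.foldl_cons, show pvStepA (true, acc) l
          = (true, acc ++ ["   <li>" ++ PySem.Str.strip (PySem.Str.slice l (some 2) none) ++ "</li>\n"]) by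
            simp [pvStepA, pvIsItem] at h ⊢; simp [h]]
        rw [(ih _).2]
        simp [h, pvItem]
    · simp only [Bool.not_eq_true] at h
      constructor
      · rw [List.foldl_cons, show pvStepA (false, acc) l = (false, acc ++ [l]) by
          simp [pvStepA, pvIsItem] at h ⊢; simp [h]]
        rw [(ih _).1]
        simp [convert_markdown_ol_list_to_html_alt, h]
      · rw [List.foldl_cons, show pvStepA (true, acc) l
          = (false, (acc ++ ["</ol>\n"]) ++ [l]) by
            simp [pvStepA, pvIsItem] at h ⊢; simp [h]]
        rw [(ih _).1]
        simp [convert_markdown_ol_list_to_html_alt, h]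

-- ===== VERDICT (by name: the statement is the Claim_ definition above) =====
theorem convert_markdown_ol_list_to_html_spec : Claim_equal_convert_markdown_ol_list_to_html := by
  intro lines _
  show convert_markdown_ol_list_to_html lines = _
  have := (pvLoop lines []).1
  simpa [convert_markdown_ol_list_to_html, pvFinish] using this
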